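-- pv_equiv track=rewrite | github.com/petteriTeikari/deep-biblio-tools | scripts/extract_markdown_bibliography.py | _generate_key_from_title
-- ===== SOURCE A (Python) =====
-- def _generate_key_from_title(title: str, year: str) -> str:
--     """Generate key from title when author is not available."""
--     # Take first significant word from title
--     words = []
--     current_word = ""
--     for char in title.lower():
--         if char.isalpha():
--             current_word += char
--         elif current_word:
--             words.append(current_word)
--             current_word = ""
--     if current_word:
--         words.append(current_word)
--
--     key_base = words[0] if words else "misc"
--     return f"{key_base}{year}"
-- ===== SOURCE B (Python) =====
-- from itertools import groupby
--
--
-- def _generate_key_from_title(title: str, year: str) -> str: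
--     """Generate key from title when author is not available."""
--     key_base = "misc"
--     for is_alpha, chars in groupby(title.lower(), str.isalpha):
--         if is_alpha:
--             key_base = "".join(chars)
--             break
--     return f"{key_base}{year}"
-- ===== Notes on version B (the rewrite author's own statement) =====
-- stated objective: idiomatic
-- what changed: Replaces the hand-rolled word accumulator (which scans the whole title and builds a full word list) with itertools.groupby over the lowered title, taking the first alphabetic run and breaking immediately.
import Mathlib
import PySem

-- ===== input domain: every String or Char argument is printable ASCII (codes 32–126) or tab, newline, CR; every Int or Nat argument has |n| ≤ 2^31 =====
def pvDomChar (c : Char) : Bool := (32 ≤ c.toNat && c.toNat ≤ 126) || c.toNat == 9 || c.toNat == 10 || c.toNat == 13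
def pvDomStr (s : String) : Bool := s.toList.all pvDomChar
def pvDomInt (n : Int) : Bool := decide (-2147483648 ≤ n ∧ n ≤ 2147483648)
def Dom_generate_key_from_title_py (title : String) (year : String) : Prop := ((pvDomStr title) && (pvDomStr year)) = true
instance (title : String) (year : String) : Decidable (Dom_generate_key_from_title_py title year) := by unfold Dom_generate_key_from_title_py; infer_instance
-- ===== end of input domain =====

-- B replaces A's hand-rolled word-list accumulator with taking the first alphabetic run
-- of the lowered title directly (groupby-style dropWhile/takeWhile); idiomatic, same cost.


-- ===== PORT A =====
-- A's loop over title.lower(): accumulate current_word, flush it into words at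
-- non-alphabetic chars; returns the final words list (words as List Char).
def pvLoopA : List Char → List (List Char) → List Char → List (List Char)
  | [], words, cur => if cur ≠ [] then words ++ [cur] else words
  | c :: cs, words, cur =>
      if PySem.Chars.isalpha c then pvLoopA cs words (cur ++ [c])
      else if cur ≠ [] then pvLoopA cs (words ++ [cur]) []
      else pvLoopA cs words cur

def generate_key_from_title_py (title : String) (year : String) : String :=
  let words := pvLoopA (PySem.Chars.lower title.toList) [] []
  let key_base := match words with
    | [] => "misc"
    | w :: _ => String.ofList w
  key_base ++ year

-- ===== PORT B =====
-- first group of groupby(title.lower(), str.isalpha) with key True, else "misc"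
def generate_key_from_title_py_alt (title : String) (year : String) : String :=
  let run := ((PySem.Chars.lower title.toList).dropWhile
                (fun c => !PySem.Chars.isalpha c)).takeWhile PySem.Chars.isalpha
  let key_base := if run.isEmpty then "misc" else String.ofList run
  key_base ++ year

-- ===== PRECONDITION & SPEC =====
def Spec_generate_key_from_title_py (title : String) (year : String) (out : String) : Prop := out = generate_key_from_title_py_alt title year
instance (title : String) (year : String) (out : String) : Decidable (Spec_generate_key_from_title_py title year out) := by unfold Spec_generate_key_from_title_py; infer_instance

-- ===== CLAIM (what is proved, stated in full; the proofs are below) =====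
def Claim_equal_generate_key_from_title_py : Prop := ∀ (title : String) (year : String), Dom_generate_key_from_title_py title year → Spec_generate_key_from_title_py title year (generate_key_from_title_py title year)

-- ===== LEMMAS AND PROOFS =====

-- the words accumulator only ever grows on the right
lemma pvLoopA_append (cs : List Char) (ws : List (List Char)) (cur : List Char) :
    pvLoopA cs ws cur = ws ++ pvLoopA cs [] cur := by
  induction cs generalizing ws cur with
  | nil => simp only [pvLoopA]; split <;> simp
  | cons c cs ih =>
    simp only [pvLoopA]
    split_ifs with h1 h2
    · exact ih ws (cur ++ [c])
    · rw [ih (ws ++ [cur]) [], ih ([] ++ [cur]) []]; simp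
    · exact ih ws cur

-- a nonempty current word: the first emitted word is cur extended by the next alpha run
lemma pvLoopA_head_of_ne (cs : List Char) (cur : List Char) (h : cur ≠ []) :
    (pvLoopA cs [] cur).head? = some (cur ++ cs.takeWhile PySem.Chars.isalpha) := by
  induction cs generalizing cur with
  | nil => simp [pvLoopA, h]
  | cons c cs ih =>
    simp only [pvLoopA]
    split_ifs with h1
    · rw [ih (cur ++ [c]) (by simp)]
      simp [List.takeWhile, h1]
    · rw [List.nil_append, pvLoopA_append]
      simp [List.takeWhile, h1]

-- empty current word: the first emitted word is the first alphabetic run, if any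
lemma pvLoopA_head_nil (cs : List Char) :
    (pvLoopA cs [] []).head? =
      if ((cs.dropWhile (fun c => !PySem.Chars.isalpha c)).takeWhile
            PySem.Chars.isalpha).isEmpty then none
      else some ((cs.dropWhile (fun c => !PySem.Chars.isalpha c)).takeWhile
            PySem.Chars.isalpha) := by
  induction cs with
  | nil => simp [pvLoopA]
  | cons c cs ih =>
    by_cases h1 : PySem.Chars.isalpha c
    · have hA : pvLoopA (c :: cs) [] [] = pvLoopA cs [] [c] := by
        simp [pvLoopA, h1]
      rw [hA, pvLoopA_head_of_ne cs [c] (by simp)]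
      simp [List.dropWhile, h1]
    · have hA : pvLoopA (c :: cs) [] [] = pvLoopA cs [] [] := by
        simp [pvLoopA, h1]
      rw [hA, ih]
      simp [List.dropWhile, h1]

-- ===== VERDICT (by name: the statement is the Claim_ definition above) =====
theorem generate_key_from_title_py_spec : Claim_equal_generate_key_from_title_py := by
  intro title year _
  unfold Spec_generate_key_from_title_py generate_key_from_title_py generate_key_from_title_py_alt
  have h := pvLoopA_head_nil (PySem.Chars.lower title.toList)
  set l := PySem.Chars.lower title.toList with hl
  set r := (l.dropWhile (fun c => !PySem.Chars.isalpha c)).takeWhile PySem.Chars.isalpha with hr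
  by_cases hre : r.isEmpty
  · rw [if_pos hre, List.head?_eq_none_iff] at h
    simp [h, hre]
  · rw [if_neg hre] at h
    obtain ⟨tl, htl⟩ := List.head?_eq_some_iff.mp h
    simp [htl, hre]
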